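-- pv_equiv track=rewrite | github.com/pirate-pro/get-resume-direction | app/crawler/adapters/remoteok_real.py | _normalize_city
-- ===== SOURCE A (Python) =====
-- def _normalize_city(value: str | None) -> str:
--     if not value:
--         return "Remote"
--
--     text = str(value).strip()
--     for sep in [";", "/", "|", "，", ",", "·"]:
--         if sep in text:
--             text = text.split(sep, 1)[0].strip()
--
--     if not text:
--         return "Remote"
--     if len(text) > 60:
--         return "Remote"
--     return text
-- ===== SOURCE B (Python) =====
-- def _normalize_city(value):
--     if not value:
--         return "Remote"
--     text = str(value).strip()
--     # single pass: keep chars up to the first separator, instead of repeated split/strip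
--     head = []
--     for ch in text:
--         if ch in ";/|，,·":
--             break
--         head.append(ch)
--     text = "".join(head).strip()
--     if not text or len(text) > 60:
--         return "Remote"
--     return text
-- ===== Notes on version B (the rewrite author's own statement) =====
-- stated objective: alternative
-- what changed: Replaces A's sequential loop of split(sep,1)[0]+strip over six separators by a single left-to-right scan of the characters that stops at the first separator, followed by one final strip.
import Mathlib
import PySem

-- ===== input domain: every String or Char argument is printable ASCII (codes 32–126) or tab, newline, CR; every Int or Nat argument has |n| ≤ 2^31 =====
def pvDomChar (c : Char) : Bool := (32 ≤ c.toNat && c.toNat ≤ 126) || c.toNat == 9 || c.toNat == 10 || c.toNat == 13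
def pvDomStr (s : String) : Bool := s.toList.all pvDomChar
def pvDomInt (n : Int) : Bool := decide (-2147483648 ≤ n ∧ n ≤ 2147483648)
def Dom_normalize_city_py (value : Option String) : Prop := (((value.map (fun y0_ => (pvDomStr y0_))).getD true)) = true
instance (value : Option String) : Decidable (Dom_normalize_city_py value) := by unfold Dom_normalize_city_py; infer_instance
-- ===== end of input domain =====

-- B replaces A's sequential split-on-each-separator loop by a single left-to-right scan that
-- stops at the first separator character (objective: alternative decomposition, same cost).

-- ===== PORT A =====
-- literal port of A: for each separator, if it occurs, keep the part before its first
-- occurrence and strip.  `text.split(sep, 1)[0]` is splitMax?; the `.getD` defaults are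
-- never reached (sep ≠ "" and a split result is never empty, so Python never raises here).
def normalize_city_py (value : Option String) : String :=
  match value with
  | none => "Remote"
  | some s =>
    if s = "" then "Remote"
    else
      let text := PySem.Str.strip s
      let text := [";", "/", "|", "，", ",", "·"].foldl
        (fun t sep =>
          if PySem.Str.isIn sep t then
            PySem.Str.strip ((PySem.List.pyGet? ((PySem.Str.splitMax? t sep 1).getD []) 0).getD "")
          else t) text
      if text = "" then "Remote"
      else if 60 < PySem.Str.len text then "Remote"
      else text

-- ===== PORT B =====
def pvSepChars : List Char := [';', '/', '|', '，', ',', '·']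

-- literal port of B: the for/ch loop with `break` is `takeWhile` over the characters.
def normalize_city_py_alt (value : Option String) : String :=
  match value with
  | none => "Remote"
  | some s =>
    if s = "" then "Remote"
    else
      let text := PySem.Chars.strip s.toList
      let head := text.takeWhile (fun ch => !(pvSepChars.contains ch))
      let text2 := PySem.Chars.strip head
      if text2 = [] ∨ 60 < (text2.length : Int) then "Remote"
      else String.ofList text2

-- ===== PRECONDITION & SPEC =====
def Spec_normalize_city_py (value : Option String) (out : String) : Prop := out = normalize_city_py_alt value
instance (value : Option String) (out : String) : Decidable (Spec_normalize_city_py value out) := by unfold Spec_normalize_city_py; infer_instance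

-- ===== CLAIM (what is proved, stated in full; the proofs are below) =====
def Claim_equal_normalize_city_py : Prop := ∀ (value : Option String), Dom_normalize_city_py value → Spec_normalize_city_py value (normalize_city_py value)

-- ===== LEMMAS AND PROOFS =====

-- A's per-separator step, at the character level
def pvStepC (t : List Char) (c : Char) : List Char :=
  if c ∈ t then PySem.Chars.strip (t.takeWhile (fun x => x != c)) else t

lemma pv_singleton_infix (c : Char) (l : List Char) : [c] <:+: l ↔ c ∈ l := by
  constructor
  · intro h; exact h.mem (by simp)
  · intro h
    obtain ⟨l₁, l₂, rfl⟩ := List.append_of_mem h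
    exact ⟨l₁, l₂, by simp⟩

-- v = rstrip v ++ (all-whitespace tail)
lemma pv_rstrip_decomp (v : List Char) :
    v = PySem.Chars.rstrip v ++ (v.reverse.takeWhile PySem.Chars.isspace).reverse := by
  unfold PySem.Chars.rstrip
  rw [← List.reverse_append, List.takeWhile_append_dropWhile, List.reverse_reverse]

lemma pv_rstrip_tail_ws (v : List Char) :
    ∀ c ∈ (v.reverse.takeWhile PySem.Chars.isspace).reverse, PySem.Chars.isspace c = true := by
  intro c hc
  rw [List.mem_reverse] at hc
  exact List.mem_takeWhile_imp hc

lemma pv_rstrip_append_ws (x w : List Char) (hw : ∀ c ∈ w, PySem.Chars.isspace c = true) :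
    PySem.Chars.rstrip (x ++ w) = PySem.Chars.rstrip x := by
  have hw' : List.dropWhile PySem.Chars.isspace w.reverse = [] :=
    List.dropWhile_eq_nil_iff.mpr (fun c hc => hw c (List.mem_reverse.mp hc))
  unfold PySem.Chars.rstrip
  rw [List.reverse_append, List.dropWhile_append, hw']
  simp

lemma pv_lstrip_append_ws (w x : List Char) (hw : ∀ c ∈ w, PySem.Chars.isspace c = true) :
    PySem.Chars.lstrip (w ++ x) = PySem.Chars.lstrip x := by
  have hw' : List.dropWhile PySem.Chars.isspace w = [] := List.dropWhile_eq_nil_iff.mpr hw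
  unfold PySem.Chars.lstrip
  rw [List.dropWhile_append, hw']
  simp

lemma pv_strip_append_ws_left (w x : List Char) (hw : ∀ c ∈ w, PySem.Chars.isspace c = true) :
    PySem.Chars.strip (w ++ x) = PySem.Chars.strip x := by
  unfold PySem.Chars.strip
  rw [pv_lstrip_append_ws w x hw]

lemma pv_strip_append_ws_right (x w : List Char) (hw : ∀ c ∈ w, PySem.Chars.isspace c = true) :
    PySem.Chars.strip (x ++ w) = PySem.Chars.strip x := by
  have hw' : List.dropWhile PySem.Chars.isspace w = [] := List.dropWhile_eq_nil_iff.mpr hw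
  unfold PySem.Chars.strip PySem.Chars.lstrip
  rw [List.dropWhile_append]
  by_cases h : (List.dropWhile PySem.Chars.isspace x).isEmpty = true
  · rw [if_pos h, hw']
    rw [List.isEmpty_iff] at h
    rw [h]
  · rw [if_neg h]
    exact pv_rstrip_append_ws _ _ hw

lemma pv_strip_takeWhile_strip (p : Char → Bool)
    (hp : ∀ c, PySem.Chars.isspace c = true → p c = true) (u : List Char) :
    PySem.Chars.strip ((PySem.Chars.strip u).takeWhile p) = PySem.Chars.strip (u.takeWhile p) := by
  have hwmem : ∀ c ∈ u.takeWhile PySem.Chars.isspace, PySem.Chars.isspace c = true :=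
    fun c hc => List.mem_takeWhile_imp hc
  have hwp : List.takeWhile p (u.takeWhile PySem.Chars.isspace) = u.takeWhile PySem.Chars.isspace :=
    List.takeWhile_eq_self_iff.mpr (fun c hc => hp c (hwmem c hc))
  -- right-hand side: peel off the all-whitespace prefix of u
  have hsplit : u = u.takeWhile PySem.Chars.isspace ++ u.dropWhile PySem.Chars.isspace :=
    List.takeWhile_append_dropWhile.symm
  have hrhs : PySem.Chars.strip (u.takeWhile p)
      = PySem.Chars.strip ((u.dropWhile PySem.Chars.isspace).takeWhile p) := by
    conv_lhs => rw [hsplit]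
    rw [List.takeWhile_append, hwp, if_pos rfl]
    exact pv_strip_append_ws_left _ _ hwmem
  -- left-hand side: strip u = rstrip (lstrip u), lstrip u = dropWhile isspace u
  have hlhs : PySem.Chars.strip u = PySem.Chars.rstrip (u.dropWhile PySem.Chars.isspace) := rfl
  rw [hlhs, hrhs]
  -- now compare over v := dropWhile isspace u, decomposed as rstrip v ++ all-ws tail
  set v := u.dropWhile PySem.Chars.isspace with hv
  have hdec := pv_rstrip_decomp v
  have htail := pv_rstrip_tail_ws v
  conv_rhs => rw [hdec]
  rw [List.takeWhile_append]
  by_cases hx : (List.takeWhile p (PySem.Chars.rstrip v)).length = (PySem.Chars.rstrip v).length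
  · have hx' : List.takeWhile p (PySem.Chars.rstrip v) = PySem.Chars.rstrip v :=
      (List.takeWhile_prefix p).eq_of_length hx
    rw [if_pos hx, hx']
    have htail' : ∀ c ∈ List.takeWhile p (v.reverse.takeWhile PySem.Chars.isspace).reverse,
        PySem.Chars.isspace c = true :=
      fun c hc => htail c ((List.takeWhile_prefix p).sublist.mem hc)
    exact (pv_strip_append_ws_right _ _ htail').symm
  · rw [if_neg hx]

lemma pv_strip_strip (u : List Char) :
    PySem.Chars.strip (PySem.Chars.strip u) = PySem.Chars.strip u := by
  have htw : ∀ (z : List Char), z.takeWhile (fun _ => true) = z :=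
    fun z => List.takeWhile_eq_self_iff.mpr (by simp)
  have h := pv_strip_takeWhile_strip (fun _ => true) (by simp) u
  rwa [htw, htw] at h

lemma pv_takeWhile_congr (p q : Char → Bool) (l : List Char) (h : ∀ a ∈ l, p a = q a) :
    l.takeWhile p = l.takeWhile q := by
  induction l with
  | nil => simp
  | cons a l ih =>
    have ha := h a (by simp)
    by_cases hp : p a = true
    · rw [List.takeWhile_cons, List.takeWhile_cons, hp, ← ha, hp]
      simp [ih fun x hx => h x (by simp [hx])]
    · have hp' : p a = false := by simpa using hp
      rw [List.takeWhile_cons, List.takeWhile_cons, hp', ← ha, hp']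
      simp

lemma pv_fold_eq (seps : List Char) (hns : ∀ c ∈ seps, PySem.Chars.isspace c = false) :
    ∀ t, PySem.Chars.strip t = t →
    seps.foldl pvStepC t = PySem.Chars.strip (t.takeWhile (fun ch => !(seps.contains ch))) := by
  induction seps with
  | nil =>
    intro t ht
    have htw : t.takeWhile (fun ch => !(([] : List Char).contains ch)) = t :=
      List.takeWhile_eq_self_iff.mpr (by simp)
    rw [List.foldl_nil, htw, ht]
  | cons s rest ih =>
    intro t ht
    have hrest_ns : ∀ c ∈ rest, PySem.Chars.isspace c = false :=
      fun c hcm => hns c (by simp [hcm])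
    rw [List.foldl_cons]
    by_cases hc : s ∈ t
    · have hstep : pvStepC t s = PySem.Chars.strip (t.takeWhile (fun x => x != s)) := by
        simp [pvStepC, hc]
      rw [hstep, ih hrest_ns _ (pv_strip_strip _)]
      have hp : ∀ c, PySem.Chars.isspace c = true → (!(rest.contains c)) = true := by
        intro c hcs
        have hni : c ∉ rest := fun hm => by
          rw [hrest_ns c hm] at hcs
          exact Bool.false_ne_true hcs
        simp [hni]
      rw [pv_strip_takeWhile_strip _ hp, List.takeWhile_takeWhile]
      congr 1
      apply pv_takeWhile_congr
      intro a _
      by_cases has : a = s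
      · simp [has]
      · simp [has]
    · have hstep : pvStepC t s = t := by simp [pvStepC, hc]
      rw [hstep, ih hrest_ns _ ht]
      congr 1
      apply pv_takeWhile_congr
      intro a ha
      have hne : a ≠ s := fun h => hc (h ▸ ha)
      simp [hne]

lemma pv_go_zero (c : Char) (fuel : Nat) (l cur : List Char) (acc : List (List Char)) :
    PySem.Chars.splitOnMax.go [c] fuel 0 l cur acc = ((cur.reverse ++ l) :: acc).reverse := by
  cases fuel <;> cases l <;> simp [PySem.Chars.splitOnMax.go]

lemma pv_go_one (c : Char) : ∀ (fuel : Nat) (l cur : List Char) (acc : List (List Char)),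
    l.length ≤ fuel →
    PySem.Chars.splitOnMax.go [c] fuel 1 l cur acc =
      acc.reverse ++ (if c ∈ l then
        [cur.reverse ++ l.takeWhile (fun x => x != c), (l.dropWhile (fun x => x != c)).tail]
      else [cur.reverse ++ l]) := by
  intro fuel
  induction fuel with
  | zero =>
    intro l cur acc h
    have hl : l = [] := List.length_eq_zero_iff.mp (Nat.le_zero.mp h)
    subst hl
    simp [PySem.Chars.splitOnMax.go]
  | succ fuel ih =>
    intro l cur acc h
    cases l with
    | nil => simp [PySem.Chars.splitOnMax.go]
    | cons a l' =>
      by_cases hca : c = a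
      · subst hca
        have hpre : [c].isPrefixOf (c :: l') = true := by simp [List.isPrefixOf]
        simp only [PySem.Chars.splitOnMax.go, hpre, if_true]
        rw [if_neg (by norm_num)]
        simp only [List.length_cons, List.drop_succ_cons]
        rw [pv_go_zero]
        simp
      · have hpre : [c].isPrefixOf (a :: l') = false := by simp [List.isPrefixOf, hca]
        simp only [PySem.Chars.splitOnMax.go, hpre]
        rw [if_neg (by norm_num), if_neg (by simp)]
        rw [ih l' (a :: cur) acc (by simpa using h)]
        have hac : (a != c) = true := bne_iff_ne.mpr (Ne.symm hca)
        by_cases hcl : c ∈ l'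
        · have : c ∈ a :: l' := by simp [hcl]
          simp [hcl, this, hac]
        · have : c ∉ a :: l' := by simp [hcl, hca]
          simp [hcl, this]

lemma pv_splitOnMax_one (c : Char) (s : List Char) (hc : c ∈ s) :
    PySem.Chars.splitOnMax s [c] 1 =
      [s.takeWhile (fun x => x != c), (s.dropWhile (fun x => x != c)).tail] := by
  unfold PySem.Chars.splitOnMax
  rw [if_neg (by norm_num)]
  rw [show (1 : Int).toNat = 1 from rfl]
  rw [pv_go_one c (s.length + 1) s [] [] (by omega)]
  simp [hc]

-- A's string-level step equals pvStepC on the character lists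
lemma pv_stepStr (c : Char) (sep t : String) (hsep : sep.toList = [c]) :
    (if PySem.Str.isIn sep t then
       PySem.Str.strip ((PySem.List.pyGet? ((PySem.Str.splitMax? t sep 1).getD []) 0).getD "")
     else t).toList = pvStepC t.toList c := by
  have hin : PySem.Str.isIn sep t = PySem.Chars.isIn [c] t.toList := by
    rw [PySem.Str.isIn_eq, hsep]
  by_cases hc : c ∈ t.toList
  · have htrue : PySem.Str.isIn sep t = true := by
      rw [hin]
      exact (PySem.Chars.isIn_iff_infix _ _).mpr ((pv_singleton_infix c t.toList).mpr hc)
    rw [if_pos htrue]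
    have hsplit : PySem.Str.splitMax? t sep 1 =
        some [String.ofList (t.toList.takeWhile (fun x => x != c)),
              String.ofList ((t.toList.dropWhile (fun x => x != c)).tail)] := by
      rw [PySem.Str.splitMax?]
      rw [hsep]
      rw [PySem.Chars.splitMax?]
      rw [if_neg (by simp)]
      rw [pv_splitOnMax_one c t.toList hc]
      rfl
    rw [hsplit]
    simp [pvStepC, hc, PySem.List.pyGet?, PySem.List.pyIdx?]
  · have hfalse : PySem.Str.isIn sep t = false := by
      rw [hin]
      exact (PySem.Chars.isIn_eq_false_iff _ _).mpr
        (fun hinf => hc ((pv_singleton_infix c t.toList).mp hinf))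
    rw [if_neg (by rw [hfalse]; exact Bool.false_ne_true)]
    simp [pvStepC, hc]

-- fold over the six separator strings = fold of pvStepC over the six separator characters
lemma pv_fold_toList (seps : List String) (cs : List Char)
    (h : List.Forall₂ (fun (sep : String) (c : Char) => sep.toList = [c]) seps cs) :
    ∀ t : String,
    (seps.foldl (fun t sep =>
        if PySem.Str.isIn sep t then
          PySem.Str.strip ((PySem.List.pyGet? ((PySem.Str.splitMax? t sep 1).getD []) 0).getD "")
        else t) t).toList = cs.foldl pvStepC t.toList := by
  induction h with
  | nil => intro t; rfl
  | cons hsc hrest ih =>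
    intro t
    rw [List.foldl_cons, List.foldl_cons, ih, pv_stepStr _ _ _ hsc]

lemma pv_main (s : String) (hs : ¬ s = "") :
    normalize_city_py (some s) = normalize_city_py_alt (some s) := by
  have hforall : List.Forall₂ (fun (sep : String) (c : Char) => sep.toList = [c])
      [";", "/", "|", "，", ",", "·"] [';', '/', '|', '，', ',', '·'] := by
    refine .cons (by decide) (.cons (by decide) (.cons (by decide)
      (.cons (by decide) (.cons (by decide) (.cons (by decide) .nil)))))
  simp only [normalize_city_py, normalize_city_py_alt, pvSepChars, if_neg hs]
  set L := PySem.Chars.strip ((PySem.Chars.strip s.toList).takeWhile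
      (fun ch => !(([';', '/', '|', '，', ',', '·'] : List Char).contains ch))) with hLdef
  have htA : (List.foldl (fun t sep =>
        if PySem.Str.isIn sep t then
          PySem.Str.strip ((PySem.List.pyGet? ((PySem.Str.splitMax? t sep 1).getD []) 0).getD "")
        else t) (PySem.Str.strip s) [";", "/", "|", "，", ",", "·"]).toList = L := by
    rw [pv_fold_toList _ _ hforall, PySem.Str.toList_strip,
        pv_fold_eq _ (by intro c hc; fin_cases hc <;> rfl) _ (pv_strip_strip _)]
  have hA' := congrArg String.ofList htA
  rw [String.ofList_toList] at hA'
  rw [hA']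
  by_cases hLnil : L = []
  · simp [hLnil]
  · have hne : String.ofList L ≠ "" := fun h => hLnil (by simpa using congrArg String.toList h)
    rw [if_neg hne, PySem.Str.len_eq, String.toList_ofList]
    by_cases h60 : 60 < (L.length : Int)
    · rw [if_pos h60, if_pos (Or.inr h60)]
    · rw [if_neg h60, if_neg (by simp [hLnil, h60])]

-- ===== VERDICT (by name: the statement is the Claim_ definition above) =====
theorem normalize_city_py_spec : Claim_equal_normalize_city_py := by
  intro value _
  unfold Spec_normalize_city_py
  cases value with
  | none => rfl
  | some s =>
    by_cases hs : s = ""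
    · subst hs; rfl
    · exact pv_main s hs
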